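-- pv_equiv track=rewrite | github.com/asweigart/programmedpatterns | book/visualpatterns.py | pattern57
-- ===== SOURCE A (Python) =====
-- def pattern57(step):
--     size = 1
--     for i in range(2, step + 1):
--         if i % 2 == 1:
--             size += 1
--     row = ('O' * size) + '\n'
--     pattern = row * size
--     return pattern
-- ===== SOURCE B (Python) =====
-- def pattern57(step):
--     size = max(1, (step + 1) // 2)
--     return (('O' * size) + '\n') * size
-- ===== Notes on version B (the rewrite author's own statement) =====
-- stated objective: simpler
-- what changed: Replaces the O(step) odd-counting loop with the closed-form size = max(1, (step+1)//2), then builds the square directly.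
import Mathlib
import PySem

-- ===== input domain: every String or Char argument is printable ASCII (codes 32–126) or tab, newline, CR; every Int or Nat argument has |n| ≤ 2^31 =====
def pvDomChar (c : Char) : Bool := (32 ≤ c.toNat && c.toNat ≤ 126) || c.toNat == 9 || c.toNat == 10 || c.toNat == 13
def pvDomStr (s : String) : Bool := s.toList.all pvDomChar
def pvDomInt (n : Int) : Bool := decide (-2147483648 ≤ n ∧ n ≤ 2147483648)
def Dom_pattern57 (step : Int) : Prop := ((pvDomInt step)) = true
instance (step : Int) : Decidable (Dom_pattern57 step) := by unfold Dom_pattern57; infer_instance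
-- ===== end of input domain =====

-- B replaces A's odd-counting loop by the closed form max(1,(step+1)//2); objective: simpler.

-- ===== PORT A =====
def pattern57 (step : Int) : String :=
  let size := (PySem.List.pyRange 2 (step + 1) 1).foldl
    (fun s i => if PySem.Int.mod i 2 = 1 then s + 1 else s) (1 : Int)
  let row := PySem.List.pyRepeat ['O'] size ++ ['\n']
  String.ofList (PySem.List.pyRepeat row size)

-- ===== PORT B =====
def pattern57_alt (step : Int) : String :=
  let size := max 1 (PySem.Int.floordiv (step + 1) 2)
  String.ofList (PySem.List.pyRepeat (PySem.List.pyRepeat ['O'] size ++ ['\n']) size)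

-- ===== PRECONDITION & SPEC =====
def Spec_pattern57 (step : Int) (out : String) : Prop := out = pattern57_alt step
instance (step : Int) (out : String) : Decidable (Spec_pattern57 step out) := by unfold Spec_pattern57; infer_instance

-- ===== CLAIM (what is proved, stated in full; the proofs are below) =====
def Claim_equal_pattern57 : Prop := ∀ (step : Int), Dom_pattern57 step → Spec_pattern57 step (pattern57 step)

-- ===== LEMMAS AND PROOFS =====

-- A's loop over range(2, b+1) counting odds (starting from 1) equals (b+1)//2 for b ≥ 1.
lemma pattern57_count (b : Int) (hb : 1 ≤ b) :
    (PySem.List.pyRange 2 (b + 1) 1).foldl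
      (fun s i => if PySem.Int.mod i 2 = 1 then s + 1 else s) (1 : Int)
    = PySem.Int.floordiv (b + 1) 2 := by
  induction b, hb using Int.le_induction with
  | base =>
      rw [PySem.List.pyRange_one_eq_nil (by norm_num)]
      simp [PySem.Int.floordiv]
  | succ b hb ih =>
      rw [show b + 1 + 1 = (b + 1) + 1 by ring,
          PySem.List.pyRange_one_succ_right (by omega), List.foldl_append, ih]
      simp only [List.foldl]
      rw [PySem.Int.floordiv_eq_ediv_of_pos (by norm_num),
          PySem.Int.floordiv_eq_ediv_of_pos (by norm_num),
          PySem.Int.mod_eq_emod_of_pos (by norm_num)]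
      split_ifs with h <;> omega

-- the two size computations agree for every step
lemma pattern57_size (step : Int) :
    (PySem.List.pyRange 2 (step + 1) 1).foldl
      (fun s i => if PySem.Int.mod i 2 = 1 then s + 1 else s) (1 : Int)
    = max 1 (PySem.Int.floordiv (step + 1) 2) := by
  by_cases h : 1 ≤ step
  · rw [pattern57_count step h]
    have : 1 ≤ PySem.Int.floordiv (step + 1) 2 := by
      rw [PySem.Int.floordiv_eq_ediv_of_pos (by norm_num)]; omega
    omega
  · rw [PySem.List.pyRange_one_eq_nil (by omega)]
    have : PySem.Int.floordiv (step + 1) 2 ≤ 1 := by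
      rw [PySem.Int.floordiv_eq_ediv_of_pos (by norm_num)]; omega
    simp only [List.foldl]
    omega

-- ===== VERDICT (by name: the statement is the Claim_ definition above) =====
theorem pattern57_spec : Claim_equal_pattern57 := by
  intro step _
  unfold Spec_pattern57 pattern57 pattern57_alt
  rw [pattern57_size]
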